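-- pv_equiv track=rewrite | github.com/schwarzschild-radius/opt-remarks-analyzer | analyze_benchmark.py | process_function
-- ===== SOURCE A (Python) =====
-- def process_function(func_data):
--     data = {}
--     for each_pass in func_data:
--         if each_pass['Pass'] in data and (each_pass['status'] == "Passed" or each_pass['status'] == "Analysis"):
--             data[each_pass['Pass']] += 1
--         else:
--             data[each_pass['Pass']] = 0
--     return data
-- ===== SOURCE B (Python) =====
-- def process_function(func_data):
--     # Group, per pass name, the statuses of its repeat occurrences (the first
--     # occurrence only registers the name, so its 'status' is never read), then
--     # compute each count in closed form: the length of the trailing run of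
--     # "Passed"/"Analysis" statuses among those repeats.
--     groups = {}
--     for each_pass in func_data:
--         name = each_pass['Pass']
--         if name in groups:
--             groups[name].append(each_pass['status'])
--         else:
--             groups[name] = []
--     data = {}
--     for name, repeats in groups.items():
--         run = 0
--         for status in reversed(repeats):
--             if status == "Passed" or status == "Analysis":
--                 run += 1
--             else:
--                 break
--         data[name] = run
--     return data
-- ===== Notes on version B (the rewrite author's own statement) =====
-- stated objective: alternative
-- what changed: B first groups, per pass name, the statuses of its repeat occurrences into an ordered dict of lists, then computes each count in closed form as the length of the trailing Passed/Analysis run of that group, instead of A's single sequential pass threading a reset-or-increment counter per key.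
import Mathlib
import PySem

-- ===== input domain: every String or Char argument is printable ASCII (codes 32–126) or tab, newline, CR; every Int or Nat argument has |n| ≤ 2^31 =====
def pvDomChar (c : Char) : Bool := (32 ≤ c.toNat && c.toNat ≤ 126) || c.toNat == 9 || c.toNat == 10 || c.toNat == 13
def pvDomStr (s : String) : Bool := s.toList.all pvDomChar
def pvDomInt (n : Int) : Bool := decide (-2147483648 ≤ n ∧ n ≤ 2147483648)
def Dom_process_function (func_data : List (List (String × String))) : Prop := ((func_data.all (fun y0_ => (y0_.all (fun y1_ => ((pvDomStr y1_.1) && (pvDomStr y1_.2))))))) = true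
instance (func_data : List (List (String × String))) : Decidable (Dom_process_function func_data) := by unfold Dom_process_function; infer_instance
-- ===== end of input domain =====

-- B regroups the data per pass name (keeping only the statuses of repeat occurrences,
-- which are the only ones A's short-circuit ever reads) and replaces A's threaded
-- reset-or-increment counter by a closed-form trailing-run count per group
-- (alternative decomposition, same cost).

-- ===== PORT A =====
-- loop body of A's single pass (dict lookups each_pass['Pass'] / each_pass['status'] are
-- total here via getD; Pre_ excludes the inputs where Python raises KeyError; note the
-- Python 'and' short-circuits, so each_pass['status'] is only read when the name was seen)
def pvStepA (data : PySem.Dict String Int) (each_pass : List (String × String)) : PySem.Dict String Int :=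
  let d := PySem.Dict.ofList each_pass
  if data.contains (d.getD "Pass" "") &&
      (d.getD "status" "" == "Passed" || d.getD "status" "" == "Analysis") then
    data.insert (d.getD "Pass" "") (data.getD (d.getD "Pass" "") 0 + 1)
  else
    data.insert (d.getD "Pass" "") 0

def process_function (func_data : List (List (String × String))) : List (String × Int) :=
  (func_data.foldl pvStepA PySem.Dict.empty).items

-- ===== PORT B =====
-- inner 'for status in reversed(repeats): … break' loop of B
def pvTrailRun : List String → Int
  | [] => 0
  | status :: rest =>
      if status == "Passed" || status == "Analysis" then pvTrailRun rest + 1 else 0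

-- grouping body of B: a repeat occurrence appends its status, a first occurrence
-- registers the name with an empty group (its status is never read)
def pvStepG (groups : PySem.Dict String (List String)) (each_pass : List (String × String)) : PySem.Dict String (List String) :=
  let d := PySem.Dict.ofList each_pass
  if groups.contains (d.getD "Pass" "") then
    groups.insert (d.getD "Pass" "")
      (groups.getD (d.getD "Pass" "") [] ++ [d.getD "status" ""])
  else
    groups.insert (d.getD "Pass" "") []

def process_function_alt (func_data : List (List (String × String))) : List (String × Int) :=
  (func_data.foldl pvStepG PySem.Dict.empty).items.map
    (fun p => (p.1, pvTrailRun p.2.reverse))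

-- ===== PRECONDITION & SPEC =====
-- Pre_ excludes exactly the inputs where the Python A raises KeyError: an entry without
-- the key 'Pass', or an entry without the key 'status' whose pass name already occurred
-- in an earlier entry (only then does A's short-circuit reach each_pass['status']).
def Pre_process_function (func_data : List (List (String × String))) : Prop :=
  ∀ i < func_data.length,
    (PySem.Dict.ofList (func_data.getD i [])).contains "Pass" = true ∧
    ((∃ j < i, (PySem.Dict.ofList (func_data.getD j [])).getD "Pass" "" =
               (PySem.Dict.ofList (func_data.getD i [])).getD "Pass" "") →
      (PySem.Dict.ofList (func_data.getD i [])).contains "status" = true)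
instance (func_data : List (List (String × String))) : Decidable (Pre_process_function func_data) := by
  unfold Pre_process_function; infer_instance

def pvWitness_process_function : (List (List (String × String))) :=
  [[("Pass", "licm")], [("Pass", "licm"), ("status", "Passed")], [("Pass", "gvn")]]

def Spec_process_function (func_data : List (List (String × String))) (out : List (String × Int)) : Prop := out = process_function_alt func_data
instance (func_data : List (List (String × String))) (out : List (String × Int)) : Decidable (Spec_process_function func_data out) := by unfold Spec_process_function; infer_instance

-- ===== CLAIM (what is proved, stated in full; the proofs are below) =====
def Claim_equal_process_function : Prop := ∀ (func_data : List (List (String × String))), Dom_process_function func_data → Pre_process_function func_data → Spec_process_function func_data (process_function func_data)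

-- ===== LEMMAS AND PROOFS =====

-- A's per-key counter, replayed over a key's list of repeat statuses
def pvGoodF : Int → String → Int :=
  fun v s => if s == "Passed" || s == "Analysis" then v + 1 else 0

def pvVA (sts : List String) : Int := sts.foldl pvGoodF 0

-- the dict A holds when B holds the groups g: same keys in the same order,
-- each value the counter replay of that key's group
def pvEv (g : PySem.Dict String (List String)) : PySem.Dict String Int :=
  ⟨g.items.map (fun p => (p.1, pvVA p.2))⟩

lemma pvTrailRun_reverse (l : List String) : pvTrailRun l.reverse = l.foldl pvGoodF 0 := by
  induction l using List.reverseRecOn with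
  | nil => rfl
  | append_singleton xs x ih =>
      simp [List.foldl_append, pvGoodF, pvTrailRun, ih]

lemma pvEv_contains (g : PySem.Dict String (List String)) (k : String) :
    (pvEv g).contains k = g.contains k := by
  simp [pvEv, PySem.Dict.contains, List.any_map]; rfl

lemma pvEv_get? (g : PySem.Dict String (List String)) (k : String) :
    (pvEv g).get? k = (g.get? k).map pvVA := by
  simp [pvEv, PySem.Dict.get?, List.find?_map]; rfl

lemma pvEv_insert (g : PySem.Dict String (List String)) (k : String) (sts : List String) :
    (pvEv g).insert k (pvVA sts) = pvEv (g.insert k sts) := by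
  unfold PySem.Dict.insert
  rw [pvEv_contains]
  by_cases hc : g.contains k = true
  · simp only [hc, if_pos, pvEv, List.map_map]
    refine congrArg PySem.Dict.mk (List.map_congr_left fun p _ => ?_)
    by_cases hpk : (p.1 == k) = true <;> simp [Function.comp, hpk]
  · simp only [hc, if_neg, Bool.false_eq_true, not_false_eq_true, pvEv, List.map_append,
      List.map_cons, List.map_nil]

lemma pvVA_append_good (sts : List String) (st : String)
    (hg : (st == "Passed" || st == "Analysis") = true) :
    pvVA (sts ++ [st]) = pvVA sts + 1 := by
  simp [pvVA, List.foldl_append, pvGoodF, hg]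

lemma pvVA_append_bad (sts : List String) (st : String)
    (hg : (st == "Passed" || st == "Analysis") = false) :
    pvVA (sts ++ [st]) = 0 := by
  simp [pvVA, List.foldl_append, pvGoodF, hg]

lemma pvStep_comm (g : PySem.Dict String (List String)) (ep : List (String × String)) :
    pvStepA (pvEv g) ep = pvEv (pvStepG g ep) := by
  set k := (PySem.Dict.ofList ep).getD "Pass" "" with hk
  set st := (PySem.Dict.ofList ep).getD "status" "" with hst
  have hA : pvStepA (pvEv g) ep =
      if (pvEv g).contains k && (st == "Passed" || st == "Analysis") then
        (pvEv g).insert k ((pvEv g).getD k 0 + 1)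
      else (pvEv g).insert k 0 := rfl
  have hB : pvStepG g ep =
      if g.contains k then g.insert k (g.getD k [] ++ [st]) else g.insert k [] := rfl
  rw [hA, hB]
  by_cases hc : g.contains k = true
  · have hcontains : (pvEv g).contains k = true := by rw [pvEv_contains]; exact hc
    have hevget : (pvEv g).getD k 0 = pvVA (g.getD k []) := by
      simp only [PySem.Dict.getD, pvEv_get?]
      cases g.get? k <;> rfl
    rw [if_pos hc]
    by_cases hg : (st == "Passed" || st == "Analysis") = true
    · rw [if_pos (by rw [hcontains, hg]; rfl)]
      rw [hevget, ← pvVA_append_good (g.getD k []) st hg]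
      exact pvEv_insert g k (g.getD k [] ++ [st])
    · rw [if_neg (by simp [hcontains]; simpa using hg)]
      rw [← pvVA_append_bad (g.getD k []) st (by simpa using hg)]
      exact pvEv_insert g k (g.getD k [] ++ [st])
  · have hcontains : (pvEv g).contains k = false := by
      rw [pvEv_contains]; simpa using hc
    rw [if_neg hc, if_neg (by simp [hcontains])]
    have h0 : pvVA [] = 0 := rfl
    rw [← h0]
    exact pvEv_insert g k []

lemma pvMain (fd : List (List (String × String))) :
    ∀ (g : PySem.Dict String (List String)),
    fd.foldl pvStepA (pvEv g) = pvEv (fd.foldl pvStepG g) := by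
  induction fd with
  | nil => intro g; rfl
  | cons ep fd ih =>
      intro g
      simp only [List.foldl_cons]
      rw [pvStep_comm g ep]
      exact ih _

-- ===== VERDICT (by name: the statement is the Claim_ definition above) =====
theorem process_function_spec : Claim_equal_process_function := by
  intro fd _ _
  unfold Spec_process_function process_function process_function_alt
  have hempty : (PySem.Dict.empty : PySem.Dict String Int) = pvEv PySem.Dict.empty := rfl
  rw [hempty, pvMain fd PySem.Dict.empty]
  simp only [pvEv]
  refine List.map_congr_left fun p _ => ?_
  rw [pvTrailRun_reverse]
  rfl
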